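-- pv_equiv track=rewrite | github.com/jnjahncke/rosalind_practice | Longest_Increasing_Subsequence/subsequences.py | inc_dec
-- ===== SOURCE A (Python) =====
-- def inc_dec(perm):
--     status_inc = []
--     status_dec = []
--     for i in range(len(perm)-1):
--         if perm[i] > perm[i+1]:
--             status_dec.append(True)
--             status_inc.append(False)
--         elif perm[i] < perm[i+1]:
--             status_dec.append(False)
--             status_inc.append(True)
--         elif perm[i] == perm[i+1]:
--             status_dec.append(False)
--             status_inc.append(False)
--     if False not in status_inc:
--         return("Increasing")
--     elif False not in status_dec:
--         return("Decreasing")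
-- ===== SOURCE B (Python) =====
-- def inc_dec(perm):
--     # Sort once; decide monotonicity by comparing against the sorted order,
--     # requiring distinctness so ties rule out both verdicts.
--     srt = sorted(perm)
--     distinct = all(srt[i] < srt[i + 1] for i in range(len(srt) - 1))
--     if distinct and perm == srt:
--         return "Increasing"
--     if distinct and perm == list(reversed(srt)):
--         return "Decreasing"
--     return None
-- ===== Notes on version B (the rewrite author's own statement) =====
-- stated objective: alternative
-- what changed: Replaces the elementwise scan that builds two boolean status lists with a sort-then-compare strategy: sort once, check distinctness of the sorted list, and compare perm against the sorted list and its reverse.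
import Mathlib
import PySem

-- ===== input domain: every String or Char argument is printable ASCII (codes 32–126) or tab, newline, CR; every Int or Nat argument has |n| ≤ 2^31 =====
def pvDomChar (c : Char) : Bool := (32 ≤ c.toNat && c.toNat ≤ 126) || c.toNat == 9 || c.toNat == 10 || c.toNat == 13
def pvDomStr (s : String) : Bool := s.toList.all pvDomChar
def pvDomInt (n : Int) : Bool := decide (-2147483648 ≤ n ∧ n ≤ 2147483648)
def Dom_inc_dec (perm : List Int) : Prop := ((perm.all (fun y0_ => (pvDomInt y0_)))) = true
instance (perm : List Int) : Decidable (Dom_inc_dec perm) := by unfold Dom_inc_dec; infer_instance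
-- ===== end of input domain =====

-- B replaces A's elementwise scan with sort-then-compare: a genuinely different algorithm of the same practical cost.

-- ===== PORT A =====
-- one loop step: compare perm[i] with perm[i+1], append to (status_inc, status_dec)
def incdecStep (perm : List Int) (s : List Bool × List Bool) (i : Int) : List Bool × List Bool :=
  -- perm[i] / perm[i+1]; i is always in range here
  if PySem.List.pyGetD perm i 0 > PySem.List.pyGetD perm (i+1) 0 then (s.1 ++ [false], s.2 ++ [true])
  else if PySem.List.pyGetD perm i 0 < PySem.List.pyGetD perm (i+1) 0 then (s.1 ++ [true], s.2 ++ [false])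
  else (s.1 ++ [false], s.2 ++ [false])

def inc_dec (perm : List Int) : Option String :=
  let st := (PySem.List.pyRange 0 ((perm.length : Int) - 1) 1).foldl (incdecStep perm) ([], [])
  if false ∉ st.1 then some "Increasing"
  else if false ∉ st.2 then some "Decreasing"
  else none

-- ===== PORT B =====
def inc_dec_alt (perm : List Int) : Option String :=
  let srt := PySem.List.sorted perm (fun x => x) false
  let distinct := (PySem.List.pyRange 0 ((srt.length : Int) - 1) 1).all
    (fun i => decide (PySem.List.pyGetD srt i 0 < PySem.List.pyGetD srt (i+1) 0))
  if distinct = true ∧ perm = srt then some "Increasing"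
  else if distinct = true ∧ perm = srt.reverse then some "Decreasing"
  else none

-- ===== PRECONDITION & SPEC =====
def Spec_inc_dec (perm : List Int) (out : Option String) : Prop := out = inc_dec_alt perm
instance (perm : List Int) (out : Option String) : Decidable (Spec_inc_dec perm out) := by unfold Spec_inc_dec; infer_instance

-- ===== CLAIM (what is proved, stated in full; the proofs are below) =====
def Claim_equal_inc_dec : Prop := ∀ (perm : List Int), Dom_inc_dec perm → Spec_inc_dec perm (inc_dec perm)

-- ===== LEMMAS AND PROOFS =====

-- The fold builds exactly the two mapped boolean lists.
theorem incdec_fold_spec (perm : List Int) (l : List Int) (s : List Bool × List Bool) :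
    l.foldl (incdecStep perm) s =
      (s.1 ++ l.map (fun i => decide (PySem.List.pyGetD perm i 0 < PySem.List.pyGetD perm (i+1) 0)),
       s.2 ++ l.map (fun i => decide (PySem.List.pyGetD perm i 0 > PySem.List.pyGetD perm (i+1) 0))) := by
  induction l generalizing s with
  | nil => simp
  | cons x xs ih =>
    simp only [List.foldl_cons, List.map_cons, ih]
    unfold incdecStep
    split_ifs with h1 h2
    · simp [List.append_assoc, decide_eq_true h1, decide_eq_false (lt_asymm h1)]
    · simp [List.append_assoc, decide_eq_true h2, decide_eq_false h1]
    · simp [List.append_assoc, decide_eq_false h1, decide_eq_false h2]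

-- Int-indexed adjacent comparison ↔ IsChain
theorem chain_iff_int (R : Int → Int → Prop) (l : List Int) :
    List.IsChain R l ↔
      ∀ i : Int, 0 ≤ i → i < (l.length : Int) - 1 →
        R (PySem.List.pyGetD l i 0) (PySem.List.pyGetD l (i+1) 0) := by
  rw [List.isChain_iff_getElem]
  constructor
  · intro h i h0 hlt
    rw [PySem.List.pyGetD_eq_getElem l 0 h0 (by omega),
        PySem.List.pyGetD_eq_getElem l 0 (by omega) (by omega)]
    have e : (i+1).toNat = i.toNat + 1 := by omega
    simp only [e]
    exact h i.toNat (by omega)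
  · intro h i hi
    have h0 : (0:Int) ≤ (i:Int) := by positivity
    have hv := h (i:Int) h0 (by omega)
    rw [PySem.List.pyGetD_eq_getElem l 0 h0 (by omega),
        PySem.List.pyGetD_eq_getElem l 0 (by omega) (by omega)] at hv
    have e1 : ((i:Int)).toNat = i := by omega
    have e2 : ((i:Int)+1).toNat = i + 1 := by omega
    simp only [e1, e2] at hv
    exact hv

-- A returns by the two IsChain conditions.
theorem inc_dec_char (perm : List Int) :
    inc_dec perm =
      if List.IsChain (· < ·) perm then some "Increasing"
      else if List.IsChain (· > ·) perm then some "Decreasing"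
      else none := by
  unfold inc_dec
  rw [incdec_fold_spec]
  simp only [List.nil_append]
  have memfix : ∀ (f : Int → Bool),
      (false ∉ (PySem.List.pyRange 0 ((perm.length : Int) - 1) 1).map f) ↔
      (∀ i : Int, 0 ≤ i → i < (perm.length : Int) - 1 → f i = true) := by
    intro f
    rw [List.mem_map]
    constructor
    · intro h i h0 h1
      by_contra hf
      simp only [Bool.not_eq_true] at hf
      exact h ⟨i, PySem.List.mem_pyRange_one.mpr ⟨h0, h1⟩, hf⟩
    · rintro h ⟨i, hi, hf⟩
      rcases PySem.List.mem_pyRange_one.mp hi with ⟨h0, h1⟩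
      rw [h i h0 h1] at hf
      simp at hf
  have hInc : (false ∉ (PySem.List.pyRange 0 ((perm.length : Int) - 1) 1).map
      (fun i => decide (PySem.List.pyGetD perm i 0 < PySem.List.pyGetD perm (i+1) 0))) ↔
      List.IsChain (· < ·) perm := by
    rw [memfix, chain_iff_int (· < ·) perm]
    constructor
    · intro h i h0 h1; simpa using h i h0 h1
    · intro h i h0 h1; simpa using h i h0 h1
  have hDec : (false ∉ (PySem.List.pyRange 0 ((perm.length : Int) - 1) 1).map
      (fun i => decide (PySem.List.pyGetD perm i 0 > PySem.List.pyGetD perm (i+1) 0))) ↔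
      List.IsChain (· > ·) perm := by
    rw [memfix, chain_iff_int (· > ·) perm]
    constructor
    · intro h i h0 h1; simpa using h i h0 h1
    · intro h i h0 h1; simpa using h i h0 h1
  by_cases hI : List.IsChain (· < ·) perm
  · rw [if_pos (hInc.mpr hI), if_pos hI]
  · rw [if_neg (fun hc => hI (hInc.mp hc)), if_neg hI]
    by_cases hD : List.IsChain (· > ·) perm
    · rw [if_pos (hDec.mpr hD), if_pos hD]
    · rw [if_neg (fun hc => hD (hDec.mp hc)), if_neg hD]

-- distinctness flag of B = IsChain (<) on the sorted list
theorem distinct_iff (srt : List Int) :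
    ((PySem.List.pyRange 0 ((srt.length : Int) - 1) 1).all
      (fun i => decide (PySem.List.pyGetD srt i 0 < PySem.List.pyGetD srt (i+1) 0)) = true)
    ↔ List.IsChain (· < ·) srt := by
  rw [chain_iff_int (· < ·) srt, List.all_eq_true]
  constructor
  · intro h i h0 h1
    simpa using h i (PySem.List.mem_pyRange_one.mpr ⟨h0, h1⟩)
  · intro h i hi
    rcases PySem.List.mem_pyRange_one.mp hi with ⟨h0, h1⟩
    simpa using h i h0 h1

theorem branch_inc (perm : List Int) :
    (List.IsChain (· < ·) perm) ↔
      (List.IsChain (· < ·) (PySem.List.sorted perm (fun x => x) false) ∧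
       perm = PySem.List.sorted perm (fun x => x) false) := by
  constructor
  · intro h
    have hp : perm.Pairwise (fun a b => (fun x => x) a < (fun x => x) b) := by
      simpa using List.isChain_iff_pairwise.mp h
    have hs := PySem.List.sorted_eq_of_perm_of_pairwise_lt perm perm (fun x => x)
      (List.Perm.refl perm) hp
    refine ⟨?_, hs.symm⟩
    rw [hs]; exact h
  · rintro ⟨h, he⟩; rwa [← he] at h

theorem branch_dec (perm : List Int) :
    (List.IsChain (· > ·) perm) ↔
      (List.IsChain (· < ·) (PySem.List.sorted perm (fun x => x) false) ∧
       perm = (PySem.List.sorted perm (fun x => x) false).reverse) := by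
  have hrev : List.IsChain (· < ·) perm.reverse ↔ List.IsChain (· > ·) perm := by
    rw [List.isChain_reverse]
  constructor
  · intro h
    have hc : List.IsChain (· < ·) perm.reverse := hrev.mpr h
    have hp : perm.reverse.Pairwise (fun a b => (fun x => x) a < (fun x => x) b) := by
      simpa using List.isChain_iff_pairwise.mp hc
    have hs := PySem.List.sorted_eq_of_perm_of_pairwise_lt perm perm.reverse (fun x => x)
      (List.reverse_perm perm) hp
    constructor
    · rw [hs]; exact hc
    · rw [hs, List.reverse_reverse]
  · rintro ⟨h, he⟩
    apply hrev.mp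
    rw [he, List.reverse_reverse]
    exact h

theorem inc_dec_alt_char (perm : List Int) :
    inc_dec_alt perm =
      if List.IsChain (· < ·) perm then some "Increasing"
      else if List.IsChain (· > ·) perm then some "Decreasing"
      else none := by
  unfold inc_dec_alt
  simp only [distinct_iff]
  by_cases hI : List.IsChain (· < ·) perm
  · rw [if_pos ((branch_inc perm).mp hI), if_pos hI]
  · rw [if_neg (fun hc => hI ((branch_inc perm).mpr hc)), if_neg hI]
    by_cases hD : List.IsChain (· > ·) perm
    · rw [if_pos ((branch_dec perm).mp hD), if_pos hD]
    · rw [if_neg (fun hc => hD ((branch_dec perm).mpr hc)), if_neg hD]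

-- ===== VERDICT (by name: the statement is the Claim_ definition above) =====
theorem inc_dec_spec : Claim_equal_inc_dec := by
  intro perm _
  unfold Spec_inc_dec
  rw [inc_dec_char, inc_dec_alt_char]
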